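-- pv_equiv track=rewrite | github.com/aerh3f01/USW-Software-Development | Foundation/Worksheet Seven/Task 4.py | sum_between
-- ===== SOURCE A (Python) =====
-- def sum_between(num1, num2):
--     bigger = max(num1, num2) # get bigger number
--     smaller = min(num1, num2) # get smaller number
--     sum = 0 # variable to store sum
--     calc = "" # string to store calculation
--     for num in range(smaller, bigger + 1): # loop through numbers
--         if num != smaller: # if not first number
--             calc += " + " # add plus sign
--         calc += str(num) # add number to string
--         sum += num # add number to sum
--     return f"{calc} = {sum}" # return string and sum
-- ===== SOURCE B (Python) =====
-- def sum_between(num1, num2):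
--     smaller, bigger = min(num1, num2), max(num1, num2)
--     calc = " + ".join(str(n) for n in range(smaller, bigger + 1))
--     total = (bigger - smaller + 1) * (smaller + bigger) // 2
--     return f"{calc} = {total}"
-- ===== Notes on version B (the rewrite author's own statement) =====
-- stated objective: simpler
-- what changed: Replaces the accumulator loop (with its first-iteration 'no separator' flag) by a single ' + '.join over the range, and the running sum by the arithmetic-series closed form (bigger - smaller + 1) * (smaller + bigger) // 2.
import Mathlib
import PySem

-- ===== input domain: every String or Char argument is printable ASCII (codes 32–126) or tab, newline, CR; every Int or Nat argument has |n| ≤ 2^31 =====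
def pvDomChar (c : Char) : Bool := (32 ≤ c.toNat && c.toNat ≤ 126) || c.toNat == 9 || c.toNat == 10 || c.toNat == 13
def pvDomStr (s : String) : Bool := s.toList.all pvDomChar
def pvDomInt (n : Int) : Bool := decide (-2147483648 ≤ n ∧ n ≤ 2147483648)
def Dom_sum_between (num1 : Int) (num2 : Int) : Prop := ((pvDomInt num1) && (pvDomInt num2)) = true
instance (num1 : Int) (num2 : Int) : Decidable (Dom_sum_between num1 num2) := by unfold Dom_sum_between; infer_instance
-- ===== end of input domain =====

-- B builds the calculation with a ' + '.join over the range and computes the total by the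
-- arithmetic-series closed form instead of A's accumulator loop; return values are proved equal.

-- ===== PORT A =====
def sum_between (num1 : Int) (num2 : Int) : String :=
  let bigger := max num1 num2
  let smaller := min num1 num2
  let st :=
    (PySem.List.pyRange smaller (bigger + 1) 1).foldl
      (fun (st : Int × List Char) num =>
        let c := if num ≠ smaller then st.2 ++ (" + ").toList else st.2
        (st.1 + num, c ++ PySem.Int.toChars num))
      (0, [])
  String.ofList (st.2 ++ (" = ").toList ++ PySem.Int.toChars st.1)

-- ===== PORT B =====
def sum_between_alt (num1 : Int) (num2 : Int) : String :=
  let smaller := min num1 num2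
  let bigger := max num1 num2
  let c := PySem.Chars.join (" + ").toList
      ((PySem.List.pyRange smaller (bigger + 1) 1).map PySem.Int.toChars)
  let total := PySem.Int.floordiv ((bigger - smaller + 1) * (smaller + bigger)) 2
  String.ofList (c ++ (" = ").toList ++ PySem.Int.toChars total)

-- ===== PRECONDITION & SPEC =====
def Spec_sum_between (num1 : Int) (num2 : Int) (out : String) : Prop := out = sum_between_alt num1 num2
instance (num1 : Int) (num2 : Int) (out : String) : Decidable (Spec_sum_between num1 num2 out) := by unfold Spec_sum_between; infer_instance

-- ===== CLAIM (what is proved, stated in full; the proofs are below) =====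
def Claim_equal_sum_between : Prop := ∀ (num1 : Int) (num2 : Int), Dom_sum_between num1 num2 → Spec_sum_between num1 num2 (sum_between num1 num2)

-- ===== LEMMAS AND PROOFS =====

-- A's loop over elements all ≠ s: sum accumulates, string appends sep ++ digits for each.
theorem pvFoldlTail (s : Int) (l : List Int) (hl : ∀ x ∈ l, x ≠ s) :
    ∀ (acc : Int) (c : List Char),
    l.foldl (fun (st : Int × List Char) num =>
        let c := if num ≠ s then st.2 ++ (" + ").toList else st.2
        (st.1 + num, c ++ PySem.Int.toChars num)) (acc, c)
      = (acc + l.sum, c ++ (l.map (fun n => (" + ").toList ++ PySem.Int.toChars n)).flatten) := by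
  induction l with
  | nil => intro acc c; simp
  | cons x xs ih =>
    intro acc c
    have hx : x ≠ s := hl x (by simp)
    simp only [List.foldl_cons, List.map_cons, List.flatten_cons, List.sum_cons]
    rw [ih (fun y hy => hl y (by simp [hy]))]
    simp [hx, List.append_assoc]
    ring

-- B's join over a nonempty map equals head's digits ++ flattened (sep ++ digits) tail.
theorem pvJoinEq (x : Int) (l : List Int) :
    PySem.Chars.join (" + ").toList ((x :: l).map PySem.Int.toChars)
      = PySem.Int.toChars x ++ (l.map (fun n => (" + ").toList ++ PySem.Int.toChars n)).flatten := by
  induction l generalizing x with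
  | nil => simp [PySem.Chars.join_singleton]
  | cons y ys ih =>
    simp only [List.map_cons] at *
    rw [PySem.Chars.join_cons_cons, ih y]
    simp [List.append_assoc]

-- the closed-form sum: 2 * Σ range(a,b) = (b-a)*(a+b-1) for a ≤ b
theorem pvRangeSum (a b : Int) (h : a ≤ b) :
    2 * (PySem.List.pyRange a b 1).sum = (b - a) * (a + b - 1) := by
  obtain ⟨n, hn⟩ : ∃ n : Nat, b = a + n := ⟨(b - a).toNat, by omega⟩
  subst hn
  induction n with
  | zero => simp [PySem.List.pyRange_one_eq_nil]
  | succ k ih =>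
    have hk : a ≤ a + (k : Int) := by omega
    have : (a : Int) + (k + 1 : Nat) = (a + k) + 1 := by push_cast; ring
    rw [this, PySem.List.pyRange_one_succ_right hk]
    simp only [List.sum_append, List.sum_cons, List.sum_nil]
    have := ih hk
    push_cast at this ⊢
    linear_combination this

-- ===== VERDICT (by name: the statement is the Claim_ definition above) =====
theorem sum_between_spec : Claim_equal_sum_between := by
  intro num1 num2 _
  unfold Spec_sum_between sum_between sum_between_alt
  dsimp only
  set s := min num1 num2 with hs
  set bgr := max num1 num2 with hb
  have hsb : s ≤ bgr := min_le_max
  have hlt : s < bgr + 1 := by omega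
  rw [PySem.List.pyRange_one_cons hlt]
  have htail : ∀ x ∈ PySem.List.pyRange (s + 1) (bgr + 1) 1, x ≠ s := by
    intro x hx
    have := (PySem.List.mem_pyRange_one).1 hx
    omega
  simp only [List.foldl_cons]
  rw [pvFoldlTail s _ htail]
  rw [pvJoinEq]
  have hsum : (PySem.List.pyRange (s + 1) (bgr + 1) 1).sum
      = PySem.Int.floordiv ((bgr - s + 1) * (s + bgr)) 2 - s := by
    have h2 : 2 * (PySem.List.pyRange (s + 1) (bgr + 1) 1).sum = (bgr - s) * (s + bgr + 1) := by
      have := pvRangeSum (s + 1) (bgr + 1) (by omega)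
      rw [this]; ring
    have hfd : PySem.Int.floordiv ((bgr - s + 1) * (s + bgr)) 2
        = ((bgr - s + 1) * (s + bgr)).fdiv 2 := rfl
    rw [hfd]
    have hprod : (bgr - s + 1) * (s + bgr)
        = 2 * ((PySem.List.pyRange (s + 1) (bgr + 1) 1).sum + s) := by
      have := h2; ring_nf; ring_nf at this; omega
    rw [hprod, Int.mul_fdiv_cancel_left _ (by norm_num)]
    omega
  simp [hsum]
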